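-- pv_equiv track=rewrite | github.com/Rohanberiwal/CSE232-Computer-Networks | Network_Security/Assignment1/HandCrafted/ArgonTwo.py | fill_Matrix_decryption
-- ===== SOURCE A (Python) =====
-- def calculate_rows(plaintext, key_length):
--     total_chars = len(plaintext)
--     full_rows = total_chars // key_length
--     if total_chars % key_length != 0:
--         full_rows += 1
--     return full_rows
--
-- def makeMatrix(num_rows, num_cols):
--     grid = []
--     for row in range(num_rows):
--         current_row = []
--         for col in range(num_cols):
--             current_row.append('')
--         grid.append(current_row)
--     return grid
--
-- def fill_Matrix_decryption(ciphertext, key):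
--     num_cols = len(key)
--     num_rows = calculate_rows(ciphertext, num_cols)
--     grid = makeMatrix(num_rows, num_cols)
--
--     full_cols = len(ciphertext) % num_cols
--     col_heights = []
--     for i in range(num_cols):
--         if i < full_cols:
--             col_heights.append(len(ciphertext) // num_cols + 1)
--         else:
--             col_heights.append(len(ciphertext) // num_cols)
--
--     index = 0
--     sorted_indices = sorted(range(len(key)), key=lambda x: key[x] - 1)
--     for k in sorted_indices:
--         for row in range(col_heights[k]):
--             grid[row][k] = ciphertext[index]
--             index += 1
--
--     return grid, num_rows, num_cols
-- ===== SOURCE B (Python) =====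
-- def fill_Matrix_decryption(ciphertext, key):
--     num_cols = len(key)
--     L = len(ciphertext)
--     num_rows = L // num_cols + (1 if L % num_cols != 0 else 0)
--     full = L % num_cols
--     heights = [L // num_cols + 1 if c < full else L // num_cols for c in range(num_cols)]
--     order = sorted(range(num_cols), key=lambda x: key[x] - 1)
--     col_text = [''] * num_cols
--     idx = 0
--     for k in order:
--         col_text[k] = ciphertext[idx: idx + heights[k]]
--         idx += heights[k]
--     grid = [[col_text[c][r] if r < len(col_text[c]) else '' for c in range(num_cols)]
--             for r in range(num_rows)]
--     return grid, num_rows, num_cols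
-- ===== Notes on version B (the rewrite author's own statement) =====
-- stated objective: alternative
-- what changed: B slices the ciphertext into per-column substrings along the sorted column order in one pass and then assembles the grid row-major with a double comprehension, instead of A's pre-allocated matrix mutated cell-by-cell in column-major order with a running character index.
import Mathlib
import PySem

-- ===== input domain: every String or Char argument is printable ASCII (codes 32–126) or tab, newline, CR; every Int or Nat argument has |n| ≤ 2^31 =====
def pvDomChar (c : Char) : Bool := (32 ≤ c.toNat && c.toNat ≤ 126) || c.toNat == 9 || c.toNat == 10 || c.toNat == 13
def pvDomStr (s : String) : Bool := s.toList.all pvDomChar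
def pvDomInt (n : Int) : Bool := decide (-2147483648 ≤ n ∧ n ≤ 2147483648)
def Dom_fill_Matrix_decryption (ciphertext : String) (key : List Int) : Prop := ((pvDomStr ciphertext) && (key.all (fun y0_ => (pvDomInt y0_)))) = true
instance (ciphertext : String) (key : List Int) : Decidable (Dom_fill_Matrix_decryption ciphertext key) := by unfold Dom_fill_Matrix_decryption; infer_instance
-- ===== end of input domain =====

-- B slices the ciphertext into per-column chunks along the sorted order and assembles the
-- grid row-major, instead of A's cell-by-cell column-major mutation (alternative decomposition).


-- ===== PORT A =====
def calculate_rows (plaintext : String) (key_length : Int) : Int :=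
  let total_chars : Int := PySem.Str.len plaintext
  let full_rows := PySem.Int.floordiv total_chars key_length
  if PySem.Int.mod total_chars key_length ≠ 0 then full_rows + 1 else full_rows

def makeMatrix (num_rows num_cols : Int) : List (List String) :=
  (PySem.List.pyRange 0 num_rows 1).foldl
    (fun grid _ =>
      grid ++ [(PySem.List.pyRange 0 num_cols 1).foldl (fun current_row _ => current_row ++ [""]) []])
    []

-- ciphertext[index] (a 1-char string); inside Pre_ the index is always in range, so the
-- "" default for the out-of-range case is never taken.
def pvCharAt (s : String) (index : Int) : String :=
  match PySem.Str.pyGet? s index with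
  | some ch => String.ofList [ch]
  | none => ""

-- body of "for row in range(col_heights[k]): grid[row][k] = ciphertext[index]; index += 1"
def pvInnerBodyA (ciphertext : String) (k : Int) (st : List (List String) × Int) (row : Int) :
    List (List String) × Int :=
  (PySem.List.pySetD st.1 row
     (PySem.List.pySetD (PySem.List.pyGetD st.1 row []) k (pvCharAt ciphertext st.2)),
   st.2 + 1)

-- body of "for k in sorted_indices: …"
def pvColStepA (ciphertext : String) (col_heights : List Int)
    (st : List (List String) × Int) (k : Int) : List (List String) × Int :=
  (PySem.List.pyRange 0 (PySem.List.pyGetD col_heights k 0) 1).foldl (pvInnerBodyA ciphertext k) st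

def fill_Matrix_decryption (ciphertext : String) (key : List Int) : List (List String) × Int × Int :=
  let num_cols : Int := key.length
  let num_rows := calculate_rows ciphertext num_cols
  let grid := makeMatrix num_rows num_cols
  let full_cols := PySem.Int.mod (PySem.Str.len ciphertext) num_cols
  let col_heights := (PySem.List.pyRange 0 num_cols 1).foldl
    (fun col_heights i =>
      if i < full_cols then col_heights ++ [PySem.Int.floordiv (PySem.Str.len ciphertext) num_cols + 1]
      else col_heights ++ [PySem.Int.floordiv (PySem.Str.len ciphertext) num_cols])
    []
  let sorted_indices := PySem.List.sorted (PySem.List.pyRange 0 (key.length : Int) 1)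
    (fun x => PySem.List.pyGetD key x 0 - 1) false
  let st := sorted_indices.foldl (pvColStepA ciphertext col_heights) (grid, 0)
  (st.1, num_rows, num_cols)

-- ===== PORT B =====
-- body of "for k in order: col_text[k] = ciphertext[idx: idx+heights[k]]; idx += heights[k]"
def pvColStepB (ciphertext : String) (heights : List Int) (st : List String × Int) (k : Int) :
    List String × Int :=
  let h := PySem.List.pyGetD heights k 0
  (PySem.List.pySetD st.1 k (PySem.Str.slice ciphertext (some st.2) (some (st.2 + h))), st.2 + h)

-- "col_text[c][r] if r < len(col_text[c]) else ''"
def pvCellOutB (col_text : List String) (r c : Int) : String :=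
  let col := PySem.List.pyGetD col_text c ""
  if r < PySem.Str.len col then pvCharAt col r else ""

def fill_Matrix_decryption_alt (ciphertext : String) (key : List Int) : List (List String) × Int × Int :=
  let num_cols : Int := key.length
  let L : Int := PySem.Str.len ciphertext
  let num_rows := PySem.Int.floordiv L num_cols + (if PySem.Int.mod L num_cols ≠ 0 then 1 else 0)
  let full := PySem.Int.mod L num_cols
  let heights := (PySem.List.pyRange 0 num_cols 1).map
    (fun c => if c < full then PySem.Int.floordiv L num_cols + 1 else PySem.Int.floordiv L num_cols)
  let order := PySem.List.sorted (PySem.List.pyRange 0 num_cols 1)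
    (fun x => PySem.List.pyGetD key x 0 - 1) false
  let st := order.foldl (pvColStepB ciphertext heights) (List.replicate key.length "", 0)
  let grid := (PySem.List.pyRange 0 num_rows 1).map
    (fun r => (PySem.List.pyRange 0 num_cols 1).map (fun c => pvCellOutB st.1 r c))
  (grid, num_rows, num_cols)

-- ===== PRECONDITION & SPEC =====
-- Pre_ excludes only the empty key, on which A (and B alike) raise ZeroDivisionError.
def Pre_fill_Matrix_decryption (_ciphertext : String) (key : List Int) : Prop := key ≠ []
instance (ciphertext : String) (key : List Int) : Decidable (Pre_fill_Matrix_decryption ciphertext key) := by unfold Pre_fill_Matrix_decryption; infer_instance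

def pvWitness_fill_Matrix_decryption : String × List Int := ("HELLOAB", [3, 1, 2])

def Spec_fill_Matrix_decryption (ciphertext : String) (key : List Int) (out : List (List String) × Int × Int) : Prop := out = fill_Matrix_decryption_alt ciphertext key
instance (ciphertext : String) (key : List Int) (out : List (List String) × Int × Int) : Decidable (Spec_fill_Matrix_decryption ciphertext key out) := by unfold Spec_fill_Matrix_decryption; infer_instance

-- ===== CLAIM (what is proved, stated in full; the proofs are below) =====
def Claim_equal_fill_Matrix_decryption : Prop := ∀ (ciphertext : String) (key : List Int), Dom_fill_Matrix_decryption ciphertext key → Pre_fill_Matrix_decryption ciphertext key → Spec_fill_Matrix_decryption ciphertext key (fill_Matrix_decryption ciphertext key)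

-- ===== LEMMAS AND PROOFS =====

-- cell (r,c) of A's grid / of B's column-text list
def pvCellA (g : List (List String)) (r c : Nat) : String := (g.getD r []).getD c ""
def pvColB (ct : List String) (c : Nat) : List Char := (ct.getD c "").toList
def pvCellB (ct : List String) (r c : Nat) : String :=
  if r < (pvColB ct c).length then String.ofList [(pvColB ct c).getD r ' '] else ""

lemma pv_foldl_snoc_const {α β : Type} (x : β) :
    ∀ (xs : List α) (init : List β),
      xs.foldl (fun acc _ => acc ++ [x]) init = init ++ List.replicate xs.length x := by
  intro xs
  induction xs with
  | nil => simp
  | cons y ys ih =>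
    intro init
    rw [List.foldl_cons, ih, List.append_assoc]
    simp [List.replicate_succ]

lemma pv_makeMatrix_eq (R n : Nat) :
    makeMatrix (R : Int) (n : Int) = List.replicate R (List.replicate n "") := by
  unfold makeMatrix
  rw [pv_foldl_snoc_const, pv_foldl_snoc_const]
  simp [PySem.List.length_pyRange_one]

lemma pv_foldl_snoc_ite {α : Type} (p : Int → Prop) [DecidablePred p] (a b : α) :
    ∀ (xs : List Int) (init : List α),
      xs.foldl (fun acc i => if p i then acc ++ [a] else acc ++ [b]) init
        = init ++ xs.map (fun i => if p i then a else b) := by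
  intro xs
  induction xs with
  | nil => simp
  | cons y ys ih => intro init; by_cases h : p y <;> simp [List.foldl_cons, h, ih]

lemma pv_getD_set {α : Type} (l : List α) (i j : Nat) (x d : α) :
    (l.set i x).getD j d = if j = i ∧ i < l.length then x else l.getD j d := by
  rcases Nat.lt_or_ge j l.length with hj | hj
  · by_cases hji : j = i
    · subst hji
      simp [List.getD, hj]
    · simp [List.getD, hji, Ne.symm hji, hj]
  · have h1 : l.getD j d = d := by
      simp [List.getD, List.getElem?_eq_none (by simpa using hj)]
    have h2 : (l.set i x).getD j d = d := by
      simp [List.getD, List.getElem?_eq_none (l := l.set i x) (by simpa using hj)]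
    rw [h2, h1]
    rcases Nat.lt_or_ge i l.length with hi | hi
    · have : j ≠ i := by omega
      simp [this]
    · simp [Nat.not_lt.mpr hi]
    
lemma pv_innerA (ciphertext : String) (k : Nat) :
    ∀ (h : Nat) (g : List (List String)) (i : Int),
      ((PySem.List.pyRange 0 (h : Int) 1).foldl (pvInnerBodyA ciphertext (k : Int)) (g, i)).2
          = i + h
      ∧ ((PySem.List.pyRange 0 (h : Int) 1).foldl (pvInnerBodyA ciphertext (k : Int)) (g, i)).1.length
          = g.length
      ∧ (∀ r : Nat,
          (((PySem.List.pyRange 0 (h : Int) 1).foldl (pvInnerBodyA ciphertext (k : Int)) (g, i)).1.getD r []).length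
            = (g.getD r []).length)
      ∧ (∀ r c : Nat,
          pvCellA ((PySem.List.pyRange 0 (h : Int) 1).foldl (pvInnerBodyA ciphertext (k : Int)) (g, i)).1 r c
            = if c = k ∧ r < h ∧ r < g.length ∧ c < (g.getD r []).length
              then pvCharAt ciphertext (i + r) else pvCellA g r c) := by
  intro h
  induction h with
  | zero =>
    intro g i
    simp [PySem.List.pyRange_one_eq_nil (by omega : (0:Int) ≤ 0)]
  | succ m ih =>
    intro g i
    have hrw : (((m : Nat) + 1 : Nat) : Int) = ((m : Int) + 1) := by push_cast; ring
    rw [hrw, PySem.List.pyRange_one_succ_right (by positivity), List.foldl_append]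
    obtain ⟨h2, hlen, hrowlen, hcell⟩ := ih g i
    set st := (PySem.List.pyRange 0 (m : Int) 1).foldl (pvInnerBodyA ciphertext (k : Int)) (g, i) with hst
    -- one more body application at row = m
    have hget : PySem.List.pyGetD st.1 (m : Int) [] = st.1.getD m [] := by
      simp [PySem.List.pyGetD_natCast]
    have hbody : pvInnerBodyA ciphertext (k : Int) st (m : Int)
        = (st.1.set m ((st.1.getD m []).set k (pvCharAt ciphertext st.2)), st.2 + 1) := by
      simp [pvInnerBodyA, hget, PySem.List.pySetD_natCast]
    simp only [List.foldl_cons, List.foldl_nil, hbody]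
    refine ⟨by simp [h2]; ring, ?_, ?_, ?_⟩
    · simp [hlen]
    · intro r
      rw [pv_getD_set]
      by_cases hr : r = m ∧ m < st.1.length
      · obtain ⟨rfl, hm⟩ := hr
        rw [if_pos ⟨rfl, hm⟩, List.length_set]
        exact hrowlen _
      · rw [if_neg hr]; exact hrowlen _
    · intro r c
      unfold pvCellA
      rw [pv_getD_set]
      by_cases hr : r = m ∧ m < st.1.length
      · obtain ⟨rfl, hm⟩ := hr
        rw [if_pos ⟨rfl, hm⟩, pv_getD_set]
        by_cases hc : c = k ∧ k < (st.1.getD r []).length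
        · obtain ⟨rfl, hk⟩ := hc
          rw [if_pos ⟨rfl, hk⟩, h2]
          have hcond : c = c ∧ r < r + 1 ∧ r < g.length ∧ c < (g.getD r []).length :=
            ⟨rfl, by omega, hlen ▸ hm, hrowlen r ▸ hk⟩
          rw [if_pos hcond]
        · rw [if_neg hc]
          have hfalse : ¬ (c = k ∧ r < r ∧ r < g.length ∧ c < (g.getD r []).length) := by
            rintro ⟨-, h', -, -⟩; omega
          have hcell' := hcell r c
          unfold pvCellA at hcell'
          rw [hcell', if_neg hfalse]
          have hneg : ¬ (c = k ∧ r < r + 1 ∧ r < g.length ∧ c < (g.getD r []).length) := by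
            rintro ⟨e1, -, -, e4⟩
            exact hc ⟨e1, by rw [hrowlen r]; exact e1 ▸ e4⟩
          rw [if_neg hneg]
      · rw [if_neg hr]
        have := hcell r c
        unfold pvCellA at this
        rw [this]
        have heq : (c = k ∧ r < m ∧ r < g.length ∧ c < (g.getD r []).length)
            ↔ (c = k ∧ r < m + 1 ∧ r < g.length ∧ c < (g.getD r []).length) := by
          constructor
          · rintro ⟨e1, e2, e3, e4⟩; exact ⟨e1, by omega, e3, e4⟩
          · rintro ⟨e1, e2, e3, e4⟩
            refine ⟨e1, ?_, e3, e4⟩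
            rcases Nat.lt_or_ge r m with h' | h'
            · exact h'
            · exfalso; have : r = m := by omega
              exact hr ⟨this, by rw [hlen]; omega⟩
        by_cases hcg : c = k ∧ r < m ∧ r < g.length ∧ c < (g.getD r []).length
        · rw [if_pos hcg, if_pos (heq.mp hcg)]
        · rw [if_neg hcg, if_neg (fun hx => hcg (heq.mpr hx))]
lemma pv_sum_heights (q : Nat) :
    ∀ (n f : Nat),
    (((List.range n).map (fun c => if c < f then (q : Int) + 1 else (q : Int))).sum)
      = ((n * q + min f n : Nat) : Int) := by
  intro n
  induction n with
  | zero => simp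
  | succ m ih =>
    intro f
    rw [List.range_succ, List.map_append, List.sum_append, ih f]
    by_cases h : m < f
    · rw [List.map_singleton, List.sum_singleton, if_pos h]
      have : min f (m + 1) = m + 1 := by omega
      rw [this]
      have : min f m = m := by omega
      rw [this]
      push_cast; ring
    · rw [List.map_singleton, List.sum_singleton, if_neg h]
      have h1 : min f (m + 1) = min f m := by omega
      rw [h1]
      push_cast; ring
lemma pv_main (ciphertext : String) (hs : List Int) (n R : Nat) :
    ∀ (ks : List Int), ks.Nodup → (∀ k ∈ ks, 0 ≤ k ∧ k < (n : Int)) →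
      (∀ k ∈ ks, 0 ≤ PySem.List.pyGetD hs k 0 ∧ PySem.List.pyGetD hs k 0 ≤ (R : Int)) →
    ∀ (g : List (List String)) (ct : List String) (i : Int),
      0 ≤ i → i + (ks.map (fun k => PySem.List.pyGetD hs k 0)).sum ≤ (ciphertext.toList.length : Int) →
      g.length = R → (∀ r : Nat, r < R → (g.getD r []).length = n) → ct.length = n →
      (∀ k ∈ ks, ct.getD k.toNat "" = "") →
      (∀ r c : Nat, r < R → c < n → pvCellA g r c = pvCellB ct r c) →
      (ks.foldl (pvColStepA ciphertext hs) (g, i)).1.length = R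
      ∧ (∀ r : Nat, r < R →
          (((ks.foldl (pvColStepA ciphertext hs) (g, i)).1.getD r []).length = n))
      ∧ (∀ r c : Nat, r < R → c < n →
          pvCellA (ks.foldl (pvColStepA ciphertext hs) (g, i)).1 r c
            = pvCellB (ks.foldl (pvColStepB ciphertext hs) (ct, i)).1 r c) := by
  intro ks
  induction ks with
  | nil =>
    intro _ _ _ g ct i _ _ hg hrow _ _ hagree
    exact ⟨hg, hrow, hagree⟩
  | cons k ks ih =>
    intro hnd hb hh g ct i hi hsum hg hrow hct hunproc hagree
    obtain ⟨hk0, hkn⟩ := hb k (by simp)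
    obtain ⟨hH0, hHR⟩ := hh k (by simp)
    set H := PySem.List.pyGetD hs k 0 with hH
    have hsumtail : 0 ≤ (ks.map fun k => PySem.List.pyGetD hs k 0).sum := by
      apply List.sum_nonneg
      intro x hx
      obtain ⟨y, hy, rfl⟩ := List.mem_map.mp hx
      exact (hh y (by simp [hy])).1
    have hL : i + H ≤ (ciphertext.toList.length : Int) := by
      rw [List.map_cons, List.sum_cons] at hsum; omega
    -- the A column step
    have hstep : pvColStepA ciphertext hs (g, i) k
        = (PySem.List.pyRange 0 ((H.toNat : Nat) : Int) 1).foldl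
            (pvInnerBodyA ciphertext ((k.toNat : Nat) : Int)) (g, i) := by
      simp only [pvColStepA, ← hH, Int.toNat_of_nonneg hk0, Int.toNat_of_nonneg hH0]
    obtain ⟨hA2, hAlen, hArow, hAcell⟩ := pv_innerA ciphertext k.toNat H.toNat g i
    -- the B column step
    have hstepB : pvColStepB ciphertext hs (ct, i) k
        = (ct.set k.toNat (PySem.Str.slice ciphertext (some i) (some (i + H))), i + H) := by
      simp only [pvColStepB, ← hH]
      rw [PySem.List.pySetD_of_nonneg _ _ hk0]
    -- the chunk cut out for column k
    have hchunk : (PySem.Str.slice ciphertext (some i) (some (i + H))).toList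
        = (ciphertext.toList.drop i.toNat).take H.toNat := by
      rw [PySem.Str.toList_slice, PySem.Chars.slice_eq_listSlice, PySem.List.slice_toNat _ hi (by omega)]
      congr 1
      omega
    have hchunklen : ((ciphertext.toList.drop i.toNat).take H.toNat).length = H.toNat := by
      rw [List.length_take, List.length_drop]
      omega
    rw [List.foldl_cons, List.foldl_cons, hstep, hstepB]
    -- A's index after the column equals B's
    have hA2' : ((PySem.List.pyRange 0 ((H.toNat : Nat) : Int) 1).foldl
        (pvInnerBodyA ciphertext ((k.toNat : Nat) : Int)) (g, i)).2 = i + H := by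
      rw [hA2, Int.toNat_of_nonneg hH0]
    -- package the state as a pair for ih
    have hpair : ((PySem.List.pyRange 0 ((H.toNat : Nat) : Int) 1).foldl
        (pvInnerBodyA ciphertext ((k.toNat : Nat) : Int)) (g, i))
        = (((PySem.List.pyRange 0 ((H.toNat : Nat) : Int) 1).foldl
        (pvInnerBodyA ciphertext ((k.toNat : Nat) : Int)) (g, i)).1, i + H) := by
      rw [← hA2']
    rw [hpair]
    apply ih (hnd.of_cons) (fun x hx => hb x (by simp [hx])) (fun x hx => hh x (by simp [hx]))
    · omega
    · rw [List.map_cons, List.sum_cons] at hsum; omega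
    · rw [hAlen, hg]
    · intro r hr
      rw [hArow r, hrow r hr]
    · rw [List.length_set, hct]
    · intro k' hk'
      have hne : k' ≠ k := by
        intro h; exact (List.nodup_cons.mp hnd).1 (h ▸ hk')
      have hk'0 : 0 ≤ k' := (hb k' (by simp [hk'])).1
      have : k'.toNat ≠ k.toNat := by omega
      rw [pv_getD_set]
      simp only [this, false_and, if_false]
      · exact hunproc k' (by simp [hk'])
    · intro r c hr hc
      set kc := k.toNat with hkc
      by_cases hck : c = kc
      · subst hck
        -- column being processed
        have hcolB' : pvColB (ct.set kc (PySem.Str.slice ciphertext (some i) (some (i + H)))) kc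
            = (ciphertext.toList.drop i.toNat).take H.toNat := by
          unfold pvColB
          rw [pv_getD_set, if_pos ⟨rfl, by omega⟩, hchunk]
        by_cases hrh : r < H.toNat
        · -- a freshly written cell
          have hcond : kc = kc ∧ r < H.toNat ∧ r < g.length ∧ kc < (g.getD r []).length := by
            refine ⟨rfl, hrh, by omega, by rw [hrow r hr]; omega⟩
          rw [hAcell r kc, if_pos hcond]
          unfold pvCellB
          rw [hcolB']
          rw [if_pos (by omega)]
          have hidx : i.toNat + r < ciphertext.toList.length := by omega
          have hgetchunk : (((ciphertext.toList.drop i.toNat).take H.toNat).getD r ' ')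
              = ciphertext.toList[i.toNat + r] := by
            rw [List.getD_eq_getElem _ _ (by omega)]
            rw [List.getElem_take, List.getElem_drop]
          rw [hgetchunk]
          unfold pvCharAt
          have : PySem.Str.pyGet? ciphertext (i + (r : Int))
              = some (ciphertext.toList[i.toNat + r]) := by
            rw [PySem.Str.pyGet?_eq, PySem.Chars.pyGet?_eq_listPyGet?, PySem.List.pyGet?_of_nonneg _ (by omega)]
            rw [List.getElem?_eq_getElem (by omega : (i + (r:Int)).toNat < ciphertext.toList.length)]
            congr 1
            congr 1
            omega
          rw [this]
        · -- below the column's height: stays ''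
          have hcond : ¬ (kc = kc ∧ r < H.toNat ∧ r < g.length ∧ kc < (g.getD r []).length) := by
            rintro ⟨-, h', -, -⟩; exact hrh h'
          rw [hAcell r kc, if_neg hcond, hagree r kc hr hc]
          have hctk : ct.getD kc "" = "" := by
            have := hunproc k (by simp)
            rwa [show k.toNat = kc by omega] at this
          unfold pvCellB
          rw [hcolB']
          unfold pvColB
          rw [hctk]
          simp [hchunklen, hrh]
      · -- a different column: both sides untouched
        have hcond : ¬ (c = kc ∧ r < H.toNat ∧ r < g.length ∧ c < (g.getD r []).length) := by
          rintro ⟨h', -, -, -⟩; exact hck h'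
        rw [hAcell r c, if_neg hcond, hagree r c hr hc]
        unfold pvCellB pvColB
        rw [pv_getD_set]
        simp only [hck, false_and, if_false]
lemma pv_cellOutB_eq (ct : List String) (r c : Nat) :
    pvCellOutB ct (r : Int) (c : Int) = pvCellB ct r c := by
  simp only [pvCellOutB, pvCellB, pvColB]
  rw [PySem.List.pyGetD_natCast, PySem.Str.len_eq]
  by_cases h : r < (ct.getD c "").toList.length
  · rw [if_pos (by exact_mod_cast h), if_pos h]
    unfold pvCharAt
    rw [PySem.Str.pyGet?_eq, PySem.Chars.pyGet?_eq_listPyGet?,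
        PySem.List.pyGet?_of_nonneg _ (by positivity)]
    rw [Int.toNat_natCast, List.getElem?_eq_getElem h,
        List.getD_eq_getElem _ _ h]
  · rw [if_neg (by exact_mod_cast h), if_neg h]

theorem pv_fill_eq (ciphertext : String) (key : List Int) (hpre : key ≠ []) :
    fill_Matrix_decryption ciphertext key = fill_Matrix_decryption_alt ciphertext key := by
  have hn0 : 0 < key.length := List.length_pos_iff.mpr hpre
  -- abbreviations (Nat world)
  set n : Nat := key.length with hn
  set cs : List Char := ciphertext.toList with hcs
  set L : Nat := cs.length with hL
  set q : Nat := L / n with hq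
  set f : Nat := L % n with hf
  set R : Nat := q + (if f = 0 then 0 else 1) with hR
  have hfn : f < n := Nat.mod_lt _ hn0
  have hLsum : n * q + f = L := by
    have := Nat.div_add_mod L n; rw [hq, hf]; omega
  -- the plain-Int forms of the pieces shared by the two ports
  have hlen : PySem.Str.len ciphertext = (L : Int) := by rw [PySem.Str.len_eq, hL, hcs]
  have hdiv : PySem.Int.floordiv (L : Int) (n : Int) = (q : Int) := by
    rw [hq]; exact_mod_cast PySem.Int.floordiv_natCast L n
  have hmod : PySem.Int.mod (L : Int) (n : Int) = (f : Int) := by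
    rw [hf]; exact_mod_cast PySem.Int.mod_natCast L n
  have hrows : calculate_rows ciphertext (n : Int) = (R : Int) := by
    simp only [calculate_rows, hlen, hdiv, hmod]
    by_cases h : f = 0 <;> simp [h, hR]
  have hrowsB : PySem.Int.floordiv (L : Int) (n : Int)
      + (if PySem.Int.mod (L : Int) (n : Int) ≠ 0 then 1 else 0) = (R : Int) := by
    simp only [hdiv, hmod]
    by_cases h : f = 0 <;> simp [h, hR]
  -- the (identical) height lists and sorted orders of the two ports
  set hsl : List Int := (PySem.List.pyRange 0 (n : Int) 1).map
      (fun c => if c < (f : Int) then (q : Int) + 1 else (q : Int)) with hhsl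
  set ord : List Int := PySem.List.sorted (PySem.List.pyRange 0 (n : Int) 1)
      (fun x => PySem.List.pyGetD key x 0 - 1) false with hord
  have hperm : ord.Perm (PySem.List.pyRange 0 (n : Int) 1) := PySem.List.sorted_perm _ _ _
  have hnd : ord.Nodup := hperm.nodup_iff.mpr (PySem.List.nodup_pyRange_one 0 (n : Int))
  have hmem : ∀ k ∈ ord, 0 ≤ k ∧ k < (n : Int) := by
    intro k hk
    have := (PySem.List.mem_sorted _ _ _ _).mp hk
    exact (PySem.List.mem_pyRange_one.mp this)
  have hgetH : ∀ k : Int, 0 ≤ k → k < (n : Int) →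
      PySem.List.pyGetD hsl k 0 = if k < (f : Int) then (q : Int) + 1 else (q : Int) := by
    intro k h1 h2
    rw [hhsl]
    exact PySem.List.pyGetD_map_pyRange_of_nonneg _ _ _ _ h1 h2
  have hHbnd : ∀ k ∈ ord, 0 ≤ PySem.List.pyGetD hsl k 0 ∧ PySem.List.pyGetD hsl k 0 ≤ (R : Int) := by
    intro k hk
    obtain ⟨h1, h2⟩ := hmem k hk
    rw [hgetH k h1 h2]
    by_cases h : k < (f : Int)
    · have hf0 : f ≠ 0 := by
        intro h0; rw [h0] at h; simp at h; omega
      rw [if_pos h, hR, if_neg hf0]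
      constructor <;> [positivity; (push_cast; omega)]
    · rw [if_neg h, hR]
      refine ⟨by positivity, ?_⟩
      by_cases h0 : f = 0 <;> simp [h0]
  have hlenhsl : hsl.length = n := by
    rw [hhsl, List.length_map, PySem.List.length_pyRange_one]
    omega
  have hslsum : hsl.sum = (L : Int) := by
    rw [hhsl, PySem.List.pyRange_zero_nat, List.map_map]
    have hfun : ((fun c => if c < (f : Int) then (q : Int) + 1 else (q : Int)) ∘ (fun (k : Nat) => (k : Int)))
        = (fun (c : Nat) => if c < f then (q : Int) + 1 else (q : Int)) := by
      funext c
      simp only [Function.comp]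
      by_cases h : c < f
      · rw [if_pos (by exact_mod_cast h), if_pos h]
      · rw [if_neg (by exact_mod_cast h), if_neg h]
    rw [hfun, pv_sum_heights]
    have hmin : min f n = f := by omega
    rw [hmin, hLsum]
  have hsum : ((ord.map (fun k => PySem.List.pyGetD hsl k 0)).sum) = (L : Int) := by
    rw [(hperm.map _).sum_eq]
    rw [show (n : Int) = (hsl.length : Int) from by rw [hlenhsl]]
    rw [PySem.List.map_pyGetD_pyRange_zero']
    exact hslsum
  -- run the main correspondence from the two initial states
  obtain ⟨hAlen, hArow, hAcell⟩ := pv_main ciphertext hsl n R ord hnd hmem hHbnd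
    (List.replicate R (List.replicate n "")) (List.replicate n "") 0
    le_rfl (by rw [zero_add, hsum, ← hcs, ← hL])
    (List.length_replicate) 
    (fun r hr => by rw [List.getD_replicate _ hr]; exact List.length_replicate)
    (List.length_replicate)
    (fun k _ => by
      rcases Nat.lt_or_ge k.toNat n with h | h
      · exact List.getD_replicate _ h
      · exact List.getD_eq_default _ _ (by simpa using h))
    (fun r c hr hc => by
      unfold pvCellA pvCellB pvColB
      rw [List.getD_replicate _ hr, List.getD_replicate _ hc]
      simp)
  have hrowsB : ((q : Int) + if (f : Int) ≠ 0 then 1 else 0) = (R : Int) := by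
    by_cases h : f = 0 <;> simp [h, hR]
  simp only [fill_Matrix_decryption, fill_Matrix_decryption_alt, ← hn]
  simp only [hlen, hdiv, hmod]
  simp only [hrows, hrowsB, pv_makeMatrix_eq, pv_foldl_snoc_ite, List.nil_append]
  simp only [← hhsl, ← hord]
  refine Prod.ext ?_ rfl
  simp only []
  -- the two grids
  set ST := ord.foldl (pvColStepA ciphertext hsl) (List.replicate R (List.replicate n ""), 0) with hST
  set STB := ord.foldl (pvColStepB ciphertext hsl) (List.replicate n "", 0) with hSTB
  apply List.ext_getElem
  · rw [hAlen, List.length_map, PySem.List.length_pyRange_one]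
    omega
  · intro r h1 h2
    have hrR : r < R := by rw [← hAlen]; exact h1
    rw [List.getElem_map, PySem.List.getElem_pyRange_one, zero_add]
    apply List.ext_getElem
    · rw [List.length_map, PySem.List.length_pyRange_one]
      rw [← List.getD_eq_getElem ST.1 [] h1, hArow r hrR]
      omega
    · intro c h3 h4
      have hcn : c < n := by
        rw [← List.getD_eq_getElem ST.1 [] h1, hArow r hrR] at h3; exact h3
      rw [List.getElem_map, PySem.List.getElem_pyRange_one, zero_add]
      have hLHS : ST.1[r][c] = pvCellA ST.1 r c := by
        unfold pvCellA
        rw [List.getD_eq_getElem ST.1 [] h1, List.getD_eq_getElem _ _ h3]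
      rw [hLHS, hAcell r c hrR hcn, ← pv_cellOutB_eq]
-- ===== VERDICT (by name: the statement is the Claim_ definition above) =====
theorem fill_Matrix_decryption_spec : Claim_equal_fill_Matrix_decryption := by
  intro ciphertext key _ hpre
  unfold Spec_fill_Matrix_decryption
  exact pv_fill_eq ciphertext key hpre
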